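-- pv_equiv track=rewrite | github.com/Lia413/Stage_L2 | aide.py | enlever_R_abs
-- ===== SOURCE A (Python) =====
-- def enlever_R_abs(liste_R_m, lg_onde, lg_onde_m):
--     liste_R = []
--     liste_lg = []
--     for i in range(len(lg_onde)):
--         for k in range(len(lg_onde_m)):
--             if lg_onde[i] == lg_onde_m[k]:
--                 liste_lg.append(lg_onde_m[k])
--                 liste_R.append(liste_R_m[i])
--     return liste_lg, liste_R
-- ===== SOURCE B (Python) =====
-- def enlever_R_abs(liste_R_m, lg_onde, lg_onde_m):
--     counts = {}
--     for w in lg_onde_m: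
--         counts[w] = counts.get(w, 0) + 1
--     liste_lg = []
--     liste_R = []
--     for i, w in enumerate(lg_onde):
--         c = counts.get(w, 0)
--         if c != 0:
--             liste_lg += [w] * c
--             liste_R += [liste_R_m[i]] * c
--     return liste_lg, liste_R
-- ===== Notes on version B (the rewrite author's own statement) =====
-- stated objective: faster
-- what changed: replaces the nested scan of lg_onde_m for every element of lg_onde by a counting dict built once, emitting each match block with list repetition in a single pass
import Mathlib
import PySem

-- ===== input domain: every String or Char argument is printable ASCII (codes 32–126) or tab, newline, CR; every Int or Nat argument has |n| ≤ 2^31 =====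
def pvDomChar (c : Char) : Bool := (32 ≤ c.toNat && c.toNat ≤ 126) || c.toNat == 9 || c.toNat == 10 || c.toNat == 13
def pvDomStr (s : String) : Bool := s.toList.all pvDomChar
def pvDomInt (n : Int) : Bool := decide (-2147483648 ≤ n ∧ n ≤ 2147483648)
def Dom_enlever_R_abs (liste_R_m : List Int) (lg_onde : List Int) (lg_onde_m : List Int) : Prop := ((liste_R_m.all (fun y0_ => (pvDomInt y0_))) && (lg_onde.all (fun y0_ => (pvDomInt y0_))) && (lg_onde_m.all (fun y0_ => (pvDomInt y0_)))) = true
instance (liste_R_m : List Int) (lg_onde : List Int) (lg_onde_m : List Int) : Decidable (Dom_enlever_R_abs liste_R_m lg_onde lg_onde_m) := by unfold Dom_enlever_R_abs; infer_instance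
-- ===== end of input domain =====

-- B replaces A's nested scan of lg_onde_m per element of lg_onde by a counting dict built
-- once and a single pass emitting each match block by repetition (objective: faster).

-- ===== PORT A =====
def enlever_R_abs (liste_R_m : List Int) (lg_onde : List Int) (lg_onde_m : List Int) : List Int × List Int :=
  -- state st = (liste_R, liste_lg), as declared in the Python
  let st := (PySem.List.pyRange 0 lg_onde.length 1).foldl
    (fun (st : List Int × List Int) i =>
      (PySem.List.pyRange 0 lg_onde_m.length 1).foldl
        (fun (st : List Int × List Int) k =>
          if PySem.List.pyGetD lg_onde i 0 = PySem.List.pyGetD lg_onde_m k 0 then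
            (st.1 ++ [PySem.List.pyGetD liste_R_m i 0],
             st.2 ++ [PySem.List.pyGetD lg_onde_m k 0])
          else st)
        st)
    ([], [])
  (st.2, st.1)

-- ===== PORT B =====
def enlever_R_abs_alt (liste_R_m : List Int) (lg_onde : List Int) (lg_onde_m : List Int) : List Int × List Int :=
  let counts : PySem.Dict Int Int :=
    lg_onde_m.foldl (fun d w => d.modify w 0 (· + 1)) PySem.Dict.empty
  -- state st = (liste_lg, liste_R)
  (PySem.List.enumerate lg_onde).foldl
    (fun (st : List Int × List Int) p =>
      let c := counts.getD p.2 0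
      if c ≠ 0 then
        (st.1 ++ PySem.List.pyRepeat [p.2] c,
         st.2 ++ PySem.List.pyRepeat [PySem.List.pyGetD liste_R_m p.1 0] c)
      else st)
    ([], [])

-- ===== PRECONDITION & SPEC =====
-- Pre_ excludes exactly the inputs where Python A raises IndexError: an index i of lg_onde
-- whose value occurs in lg_onde_m but with i out of range for liste_R_m (B raises there too).
def Pre_enlever_R_abs (liste_R_m : List Int) (lg_onde : List Int) (lg_onde_m : List Int) : Prop :=
  ∀ k : Fin lg_onde.length, lg_onde[k] ∈ lg_onde_m → (k : Nat) < liste_R_m.length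
instance (liste_R_m : List Int) (lg_onde : List Int) (lg_onde_m : List Int) : Decidable (Pre_enlever_R_abs liste_R_m lg_onde lg_onde_m) := by unfold Pre_enlever_R_abs; infer_instance

def pvWitness_enlever_R_abs : List Int × List Int × List Int := ([5], [7], [7])

def Spec_enlever_R_abs (liste_R_m : List Int) (lg_onde : List Int) (lg_onde_m : List Int) (out : List Int × List Int) : Prop := out = enlever_R_abs_alt liste_R_m lg_onde lg_onde_m
instance (liste_R_m : List Int) (lg_onde : List Int) (lg_onde_m : List Int) (out : List Int × List Int) : Decidable (Spec_enlever_R_abs liste_R_m lg_onde lg_onde_m out) := by unfold Spec_enlever_R_abs; infer_instance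

-- ===== CLAIM (what is proved, stated in full; the proofs are below) =====
def Claim_equal_enlever_R_abs : Prop := ∀ (liste_R_m : List Int) (lg_onde : List Int) (lg_onde_m : List Int), Dom_enlever_R_abs liste_R_m lg_onde lg_onde_m → Pre_enlever_R_abs liste_R_m lg_onde lg_onde_m → Spec_enlever_R_abs liste_R_m lg_onde lg_onde_m (enlever_R_abs liste_R_m lg_onde lg_onde_m)

-- ===== LEMMAS AND PROOFS =====

theorem cons_replicate (a : Int) (n : Nat) : a :: List.replicate n a = List.replicate n a ++ [a] := by
  rw [← List.replicate_succ, List.replicate_succ']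

-- A's inner loop over lg_onde_m appends one block of repeated matches.
theorem inner_count (x r : Int) (m : List Int) :
    ∀ (R L : List Int),
      m.foldl (fun (st : List Int × List Int) e =>
          if x = e then (st.1 ++ [r], st.2 ++ [e]) else st) (R, L)
      = (R ++ List.replicate (m.count x) r, L ++ List.replicate (m.count x) x) := by
  induction m with
  | nil => intro R L; simp
  | cons e m ih =>
    intro R L
    by_cases h : x = e
    · subst h
      simp [List.foldl_cons, ih, List.count_cons_self, List.replicate_succ', cons_replicate]
    · simp [List.foldl_cons, h, ih, Ne.symm h]

-- one outer-loop step of A equals the swap of one step of B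
theorem step_eq (liste_R_m lg_onde lg_onde_m : List Int) (i : Int) (R L : List Int) :
    (PySem.List.pyRange 0 lg_onde_m.length 1).foldl
      (fun (st : List Int × List Int) k =>
        if PySem.List.pyGetD lg_onde i 0 = PySem.List.pyGetD lg_onde_m k 0 then
          (st.1 ++ [PySem.List.pyGetD liste_R_m i 0],
           st.2 ++ [PySem.List.pyGetD lg_onde_m k 0])
        else st) (R, L)
    = Prod.swap
      ((fun (st : List Int × List Int) i =>
          let p : Int × Int := (i, PySem.List.pyGetD lg_onde i 0)
          let c := (lg_onde_m.foldl (fun d w => d.modify w 0 (· + 1))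
                      (PySem.Dict.empty : PySem.Dict Int Int)).getD p.2 0
          if c ≠ 0 then
            (st.1 ++ PySem.List.pyRepeat [p.2] c,
             st.2 ++ PySem.List.pyRepeat [PySem.List.pyGetD liste_R_m p.1 0] c)
          else st) (L, R) i) := by
  rw [PySem.List.foldl_pyRange_zero_pyGetD' lg_onde_m 0
    (fun (st : List Int × List Int) e =>
      if PySem.List.pyGetD lg_onde i 0 = e then
        (st.1 ++ [PySem.List.pyGetD liste_R_m i 0], st.2 ++ [e]) else st) (R, L)]
  rw [inner_count]
  simp only [PySem.Dict.getD_foldl_modify_add_one, PySem.Dict.getD_empty,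
    PySem.List.pyRepeat_singleton, zero_add]
  by_cases h : (lg_onde_m.count (PySem.List.pyGetD lg_onde i 0) : Int) ≠ 0
  · simp only [if_pos h, Int.toNat_natCast, Prod.swap]
  · have h0 : lg_onde_m.count (PySem.List.pyGetD lg_onde i 0) = 0 := by omega
    simp [h0]

-- the two loops over the index range, related by swapping the state components
theorem fold_swap (liste_R_m lg_onde lg_onde_m : List Int) :
    ∀ (l : List Int) (R L : List Int),
      l.foldl (fun (st : List Int × List Int) i =>
          (PySem.List.pyRange 0 lg_onde_m.length 1).foldl
            (fun (st : List Int × List Int) k =>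
              if PySem.List.pyGetD lg_onde i 0 = PySem.List.pyGetD lg_onde_m k 0 then
                (st.1 ++ [PySem.List.pyGetD liste_R_m i 0],
                 st.2 ++ [PySem.List.pyGetD lg_onde_m k 0])
              else st)
            st) (R, L)
      = Prod.swap
        (l.foldl (fun (st : List Int × List Int) i =>
            let p : Int × Int := (i, PySem.List.pyGetD lg_onde i 0)
            let c := (lg_onde_m.foldl (fun d w => d.modify w 0 (· + 1))
                        (PySem.Dict.empty : PySem.Dict Int Int)).getD p.2 0
            if c ≠ 0 then
              (st.1 ++ PySem.List.pyRepeat [p.2] c,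
               st.2 ++ PySem.List.pyRepeat [PySem.List.pyGetD liste_R_m p.1 0] c)
            else st) (L, R)) := by
  intro l
  induction l with
  | nil => intro R L; rfl
  | cons i l ih =>
    intro R L
    rw [List.foldl_cons, List.foldl_cons, step_eq liste_R_m lg_onde lg_onde_m i R L]
    exact ih _ _

-- ===== VERDICT (by name: the statement is the Claim_ definition above) =====
theorem enlever_R_abs_spec : Claim_equal_enlever_R_abs := by
  intro liste_R_m lg_onde lg_onde_m _ _
  unfold Spec_enlever_R_abs enlever_R_abs enlever_R_abs_alt
  rw [PySem.List.enumerate_eq_map_pyRange (d := 0), List.foldl_map]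
  rw [fold_swap liste_R_m lg_onde lg_onde_m]
  rfl
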